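-- pv_equiv track=rewrite | github.com/maple3142/imaginaryCTF-solution | 2021-09/most_treacherous_deceiver/solve.py | xtranslate
-- ===== SOURCE A (Python) =====
-- def xtranslate(user_function, translation):
--
--     parsed = ""
--     current_word = ""
--
--     for c in user_function:
--         if c in " \n\t\r\"=':,*/+-{}()[]":
--             if current_word in translation:
--                 current_word = translation[current_word]
--
--             parsed += current_word + c
--             current_word = ""
--
--         else:
--             current_word += c
--
--     return parsed
-- ===== SOURCE B (Python) =====
-- _DELIMS = " \n\t\r\"=':,*/+-{}()[]"
--
-- def xtranslate(user_function, translation):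
--     # slice-based tokenizer: record delimiter positions, cut words out by slicing,
--     # translate each word via dict.get, join the pieces at the end
--     pieces = []
--     start = 0
--     for i, c in enumerate(user_function):
--         if c in _DELIMS:
--             w = user_function[start:i]
--             pieces.append(translation.get(w, w))
--             pieces.append(c)
--             start = i + 1
--     return "".join(pieces)
-- ===== Notes on version B (the rewrite author's own statement) =====
-- stated objective: alternative
-- what changed: B replaces A's character-accumulator loop (building current_word one char at a time via string +=) with a slice-based tokenizer that records the start of each word, cuts words out of the input by slicing at delimiter positions, translates each via dict.get, and joins the collected pieces once at the end.
import Mathlib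
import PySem

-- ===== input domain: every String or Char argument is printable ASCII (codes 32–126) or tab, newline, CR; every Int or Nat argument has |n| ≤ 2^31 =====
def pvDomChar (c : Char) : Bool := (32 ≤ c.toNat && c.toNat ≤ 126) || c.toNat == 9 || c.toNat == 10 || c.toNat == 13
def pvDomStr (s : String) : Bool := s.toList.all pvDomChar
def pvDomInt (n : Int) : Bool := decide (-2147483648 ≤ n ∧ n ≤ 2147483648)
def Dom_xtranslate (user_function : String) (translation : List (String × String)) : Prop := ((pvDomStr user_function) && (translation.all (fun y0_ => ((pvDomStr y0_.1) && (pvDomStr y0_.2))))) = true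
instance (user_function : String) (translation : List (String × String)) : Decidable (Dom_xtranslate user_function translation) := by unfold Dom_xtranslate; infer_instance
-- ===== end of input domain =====

-- B replaces A's per-character word accumulator with a slice-based tokenizer
-- (delimiter positions → word slices → translate → join); objective: alternative.


-- ===== PORT A =====
-- the delimiter string " \n\t\r\"=':,*/+-{}()[]" as a char list (c in <str> for a single char = list membership)
def pvDelims : List Char := [' ', '\n', '\t', '\r', '"', '=', '\'', ':', ',', '*', '/', '+', '-', '{', '}', '(', ')', '[', ']']

def xtranslate (user_function : String) (translation : List (String × String)) : String :=
  -- state: (parsed, current_word), both built char by char as in A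
  let st := user_function.toList.foldl (fun (acc : List Char × List Char) c =>
    if c ∈ pvDelims then
      let cur :=
        match (PySem.Dict.mk translation).get? (String.ofList acc.2) with
        | some v => v.toList
        | none => acc.2
      (acc.1 ++ cur ++ [c], [])
    else
      (acc.1, acc.2 ++ [c])) ([], [])
  String.ofList st.1

-- ===== PORT B =====
def xtranslate_alt (user_function : String) (translation : List (String × String)) : String :=
  let cs := user_function.toList
  -- state: (pieces, start); words are slices user_function[start:i]
  let st := (PySem.List.enumerate cs).foldl (fun (acc : List (List Char) × Int) p =>
    if p.2 ∈ pvDelims then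
      let w := PySem.List.slice cs (some acc.2) (some p.1)
      let wt := ((PySem.Dict.mk translation).getD (String.ofList w) (String.ofList w)).toList
      (acc.1 ++ [wt, [p.2]], p.1 + 1)
    else
      acc) ([], 0)
  String.ofList st.1.flatten

-- ===== PRECONDITION & SPEC =====
def Spec_xtranslate (user_function : String) (translation : List (String × String)) (out : String) : Prop := out = xtranslate_alt user_function translation
instance (user_function : String) (translation : List (String × String)) (out : String) : Decidable (Spec_xtranslate user_function translation out) := by unfold Spec_xtranslate; infer_instance

-- ===== CLAIM (what is proved, stated in full; the proofs are below) =====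
def Claim_equal_xtranslate : Prop := ∀ (user_function : String) (translation : List (String × String)), Dom_xtranslate user_function translation → Spec_xtranslate user_function translation (xtranslate user_function translation)

-- ===== LEMMAS AND PROOFS =====

-- the loop bodies, named so the invariant lemma can speak about them
def pvStepA (translation : List (String × String)) (acc : List Char × List Char) (c : Char) : List Char × List Char :=
  if c ∈ pvDelims then
    let cur :=
      match (PySem.Dict.mk translation).get? (String.ofList acc.2) with
      | some v => v.toList
      | none => acc.2
    (acc.1 ++ cur ++ [c], [])
  else
    (acc.1, acc.2 ++ [c])

def pvStepB (cs : List Char) (translation : List (String × String)) (acc : List (List Char) × Int) (p : Int × Char) : List (List Char) × Int :=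
  if p.2 ∈ pvDelims then
    let w := PySem.List.slice cs (some acc.2) (some p.1)
    let wt := ((PySem.Dict.mk translation).getD (String.ofList w) (String.ofList w)).toList
    (acc.1 ++ [wt, [p.2]], p.1 + 1)
  else
    acc

-- A's translated word equals B's .getD form
theorem pvLookup_eq (translation : List (String × String)) (w : List Char) :
    (match (PySem.Dict.mk translation).get? (String.ofList w) with
      | some v => v.toList
      | none => w) =
    ((PySem.Dict.mk translation).getD (String.ofList w) (String.ofList w)).toList := by
  simp [PySem.Dict.getD]
  cases (PySem.Dict.mk translation).get? (String.ofList w) with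
  | none => simp
  | some v => simp

-- the loop invariant: A's parsed = flatten of B's pieces, A's current_word = cs[start:i]
theorem pvLoop_eq (cs : List Char) (translation : List (String × String)) :
    ∀ (rest : List Char) (i s : Nat) (pieces : List (List Char)),
      rest = cs.drop i → s ≤ i →
      (rest.foldl (pvStepA translation) (pieces.flatten, (cs.drop s).take (i - s))).1 =
      ((PySem.List.enumerate rest (i : Int)).foldl (pvStepB cs translation) (pieces, (s : Int))).1.flatten := by
  intro rest
  induction rest with
  | nil => intro i s pieces _ _; simp [PySem.List.enumerate]
  | cons c rest ih =>
    intro i s pieces hrest hsi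
    have hget : cs[i]? = some c := by
      have := congrArg (fun l : List Char => l[0]?) hrest.symm
      simpa using this
    have hrest' : rest = cs.drop (i + 1) := by
      have h := congrArg List.tail hrest
      simpa [List.tail_drop] using h
    rw [PySem.List.enumerate_cons]
    simp only [List.foldl_cons]
    have h1 : ((i : Int) + 1) = ((i + 1 : Nat) : Int) := by push_cast; ring
    by_cases hc : c ∈ pvDelims
    · -- delimiter step
      have hslice : PySem.List.slice cs (some (s : Int)) (some (i : Int)) = (cs.drop s).take (i - s) :=
        PySem.List.slice_natCast cs s i
      have hA : pvStepA translation (pieces.flatten, (cs.drop s).take (i - s)) c =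
          ((pieces ++ [((PySem.Dict.mk translation).getD (String.ofList ((cs.drop s).take (i - s))) (String.ofList ((cs.drop s).take (i - s)))).toList, [c]]).flatten, ([] : List Char)) := by
        simp [pvStepA, hc, pvLookup_eq]
      have hB : pvStepB cs translation (pieces, (s : Int)) ((i : Int), c) =
          (pieces ++ [((PySem.Dict.mk translation).getD (String.ofList ((cs.drop s).take (i - s))) (String.ofList ((cs.drop s).take (i - s)))).toList, [c]], ((i : Int) + 1)) := by
        simp [pvStepB, hc, hslice]
      rw [hA, hB, h1]
      have := ih (i + 1) (i + 1)
        (pieces ++ [((PySem.Dict.mk translation).getD (String.ofList ((cs.drop s).take (i - s))) (String.ofList ((cs.drop s).take (i - s)))).toList, [c]])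
        hrest' (le_refl _)
      simpa using this
    · -- non-delimiter step: current_word grows, B's state unchanged
      have hA : pvStepA translation (pieces.flatten, (cs.drop s).take (i - s)) c =
          (pieces.flatten, (cs.drop s).take (i - s) ++ [c]) := by
        simp [pvStepA, hc]
      have hB : pvStepB cs translation (pieces, (s : Int)) ((i : Int), c) = (pieces, (s : Int)) := by
        simp [pvStepB, hc]
      rw [hA, hB]
      have htake : (cs.drop s).take (i - s) ++ [c] = (cs.drop s).take (i + 1 - s) := by
        have hgetd : (cs.drop s)[i - s]? = some c := by
          rw [List.getElem?_drop]
          have hss : s + (i - s) = i := by omega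
          rw [hss, hget]
        have ht := List.take_add_one (l := cs.drop s) (i := i - s)
        rw [hgetd] at ht
        have h2 : i + 1 - s = (i - s) + 1 := by omega
        rw [h2, ht]
        simp
      rw [htake, h1]
      exact ih (i + 1) s pieces hrest' (by omega)

-- ===== VERDICT (by name: the statement is the Claim_ definition above) =====
theorem xtranslate_spec : Claim_equal_xtranslate := by
  intro uf translation _
  unfold Spec_xtranslate xtranslate xtranslate_alt
  have h := pvLoop_eq uf.toList translation uf.toList 0 0 [] (by simp) (le_refl 0)
  simp only [Nat.cast_zero, Nat.sub_zero, List.drop_zero, List.flatten_nil] at h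
  -- identify the inline folds with pvStepA / pvStepB
  show String.ofList (uf.toList.foldl (pvStepA translation) ([], [])).1 =
       String.ofList ((PySem.List.enumerate uf.toList 0).foldl (pvStepB uf.toList translation) ([], 0)).1.flatten
  rw [← List.take_zero (l := uf.toList)] at h
  simpa using congrArg String.ofList h
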